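-- pv_equiv track=rewrite | github.com/tzwaan/advent-of-code | 2025/day02/b.py | check_subsections
-- ===== SOURCE A (Python) =====
-- def check_subsections(candidate_id, section_length):
--     length = len(candidate_id)
--     if (length % section_length != 0):
--         return False;
--     nr_sections = length // section_length
--     section = candidate_id[:section_length]
--     for i in range(1, nr_sections):
--         start = i * section_length
--         end = (i + 1) * section_length
--         if section != candidate_id[start:end]:
--             return False;
--     return True;
-- ===== SOURCE B (Python) =====
-- def check_subsections(candidate_id, section_length):
--     length = len(candidate_id)
--     if length % section_length != 0:
--         return False
--     nr_sections = length // section_length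
--     return nr_sections <= 1 or candidate_id == candidate_id[:section_length] * nr_sections
-- ===== Notes on version B (the rewrite author's own statement) =====
-- stated objective: simpler
-- what changed: B replaces A's explicit loop comparing each section slice with a single equality test against the first section repeated nr_sections times, short-circuited by nr_sections <= 1.
import Mathlib
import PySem

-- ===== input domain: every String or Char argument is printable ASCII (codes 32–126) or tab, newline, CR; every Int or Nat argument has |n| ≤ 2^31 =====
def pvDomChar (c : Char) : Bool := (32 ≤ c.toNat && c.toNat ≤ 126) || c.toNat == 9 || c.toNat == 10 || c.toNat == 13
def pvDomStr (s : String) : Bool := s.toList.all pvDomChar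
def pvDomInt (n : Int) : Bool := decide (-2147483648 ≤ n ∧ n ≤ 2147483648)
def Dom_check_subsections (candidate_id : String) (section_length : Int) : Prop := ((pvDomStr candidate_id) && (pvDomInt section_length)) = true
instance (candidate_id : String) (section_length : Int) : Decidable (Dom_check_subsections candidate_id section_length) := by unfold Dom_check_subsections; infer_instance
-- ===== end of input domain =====

-- B replaces A's per-section comparison loop with one equality against the first section repeated; equivalence of the RETURN value on section_length ≠ 0.

-- ===== PORT A =====
-- the 'for i in range(1, nr_sections)' loop with its early 'return False'
def csLoop (cs : List Char) (sl : Int) (sec : List Char) : List Int → Bool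
  | [] => true
  | i :: rest =>
    let start := i * sl
    let stop := (i + 1) * sl
    if sec ≠ PySem.List.slice cs (some start) (some stop) then false
    else csLoop cs sl sec rest

def check_subsections (candidate_id : String) (section_length : Int) : Bool :=
  let cs := candidate_id.toList
  let length : Int := cs.length
  if PySem.Int.mod length section_length ≠ 0 then false
  else
    let nr_sections := PySem.Int.floordiv length section_length
    let sec := PySem.List.slice cs none (some section_length)
    csLoop cs section_length sec (PySem.List.pyRange 1 nr_sections 1)

-- ===== PORT B =====
-- Python's  s * n  on a string (empty for n ≤ 0)
def strTimes (xs : List Char) (n : Int) : List Char := (List.replicate n.toNat xs).flatten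

def check_subsections_alt (candidate_id : String) (section_length : Int) : Bool :=
  let cs := candidate_id.toList
  let length : Int := cs.length
  if PySem.Int.mod length section_length ≠ 0 then false
  else
    let nr_sections := PySem.Int.floordiv length section_length
    decide (nr_sections ≤ 1) || cs == strTimes (PySem.List.slice cs none (some section_length)) nr_sections

-- ===== PRECONDITION & SPEC =====
-- Pre_ excludes section_length = 0, on which Python's '%' raises ZeroDivisionError in both A and B.
def Pre_check_subsections (candidate_id : String) (section_length : Int) : Prop := section_length ≠ 0
instance (candidate_id : String) (section_length : Int) : Decidable (Pre_check_subsections candidate_id section_length) := by unfold Pre_check_subsections; infer_instance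
def pvWitness_check_subsections : String × Int := ("abab", 2)

def Spec_check_subsections (candidate_id : String) (section_length : Int) (out : Bool) : Prop := out = check_subsections_alt candidate_id section_length
instance (candidate_id : String) (section_length : Int) (out : Bool) : Decidable (Spec_check_subsections candidate_id section_length out) := by unfold Spec_check_subsections; infer_instance

-- ===== CLAIM (what is proved, stated in full; the proofs are below) =====
def Claim_equal_check_subsections : Prop := ∀ (candidate_id : String) (section_length : Int), Dom_check_subsections candidate_id section_length → Pre_check_subsections candidate_id section_length → Spec_check_subsections candidate_id section_length (check_subsections candidate_id section_length)

-- ===== LEMMAS AND PROOFS =====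

-- the early-return loop is an 'all' over the index list
lemma csLoop_eq_all (cs : List Char) (sl : Int) (sec : List Char) (l : List Int) :
    csLoop cs sl sec l = l.all (fun i => sec == PySem.List.slice cs (some (i * sl)) (some ((i + 1) * sl))) := by
  induction l with
  | nil => rfl
  | cons i rest ih =>
    simp only [csLoop, List.all_cons, ih]
    by_cases h : sec = PySem.List.slice cs (some (i * sl)) (some ((i + 1) * sl)) <;> simp [h]

-- core: all sections equal the first ↔ the list is the first section repeated n times
lemma core (L : Nat) : ∀ (n : Nat) (t : List Char), t.length = n * L →
    ((∀ j : Nat, 1 ≤ j → j < n → (t.drop (j * L)).take L = t.take L) ↔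
      t = (List.replicate n (t.take L)).flatten) := by
  intro n
  induction n with
  | zero =>
    intro t ht
    have : t = [] := List.eq_nil_of_length_eq_zero (by simpa using ht)
    subst this; simp
  | succ n ih =>
    intro t ht
    have hlen : L ≤ t.length := by simp [ht, Nat.succ_mul]
    have hsecLen : (t.take L).length = L := by simp [ht]; omega
    have hsplit : t = t.take L ++ t.drop L := (List.take_append_drop L t).symm
    have hrlen : (t.drop L).length = n * L := by simp [ht, Nat.succ_mul]
    have hr_of : t = (List.replicate (n + 1) (t.take L)).flatten →
        t.drop L = (List.replicate n (t.take L)).flatten := by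
      intro h
      have h2 : t.take L ++ t.drop L = t.take L ++ (List.replicate n (t.take L)).flatten := by
        rw [List.take_append_drop]
        conv_lhs => rw [h]
        simp [List.replicate_succ]
      exact List.append_cancel_left h2
    rcases Nat.eq_zero_or_pos n with hn | hn
    · subst hn
      have htake : t.take L = t := List.take_of_length_le (by omega)
      constructor
      · intro _; simp [htake]
      · intro _ j hj1 hj2; omega
    · -- n ≥ 1
      have hreindex : (∀ j : Nat, 1 ≤ j → j < n + 1 → (t.drop (j * L)).take L = t.take L) ↔
          (∀ j : Nat, j < n → ((t.drop L).drop (j * L)).take L = t.take L) := by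
        constructor
        · intro h j hj
          have := h (j + 1) (by omega) (by omega)
          rwa [List.drop_drop, show L + j * L = (j + 1) * L by ring]
        · intro h j hj1 hj2
          have := h (j - 1) (by omega)
          rwa [List.drop_drop, show L + (j - 1) * L = j * L by
            cases j with | zero => omega | succ k => simp [Nat.succ_mul]; ring] at this
      rw [hreindex]
      by_cases hsec : (t.drop L).take L = t.take L
      · have hih := ih (t.drop L) hrlen
        rw [hsec] at hih
        constructor
        · intro h
          have hr : t.drop L = (List.replicate n (t.take L)).flatten := by
            rw [← hih]; intro j hj1 hj2; exact h j hj2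
          calc t = t.take L ++ t.drop L := hsplit
            _ = (List.replicate (n + 1) (t.take L)).flatten := by
                rw [hr]; simp [List.replicate_succ]
        · intro h j hj
          have := hih.mpr (hr_of h)
          rcases Nat.eq_zero_or_pos j with h0 | h0
          · subst h0; simpa using hsec
          · exact this j h0 hj
      · constructor
        · intro h; exact absurd (by simpa using h 0 hn) hsec
        · intro h
          exfalso; apply hsec
          have hr := hr_of h
          rcases n with _ | m
          · omega
          · rw [hr]
            simp only [List.replicate_succ, List.flatten_cons]
            rw [List.take_append_of_le_length (by simp [hsecLen])]
            simp [hsecLen]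

-- the slice candidate_id[j*L:(j+1)*L] as drop/take, for natural j, L
lemma slice_sec (cs : List Char) (L j : Nat) :
    PySem.List.slice cs (some ((j : Int) * (L : Int))) (some (((j : Int) + 1) * (L : Int))) =
      (cs.drop (j * L)).take L := by
  have h1 : (j : Int) * (L : Int) = ((j * L : Nat) : Int) := by push_cast; ring
  have h2 : ((j : Int) + 1) * (L : Int) = (((j + 1) * L : Nat) : Int) := by push_cast; ring
  rw [h1, h2, PySem.List.slice_natCast, show (j + 1) * L - j * L = L by simp [Nat.succ_mul]]

-- the two branch results agree when section_length > 0 divides the length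
lemma pos_case (cs : List Char) (sl nr : Int) (hsl : 0 < sl)
    (hnr : nr * sl = (cs.length : Int)) :
    csLoop cs sl (PySem.List.slice cs none (some sl)) (PySem.List.pyRange 1 nr 1) =
      (decide (nr ≤ 1) || (cs == strTimes (PySem.List.slice cs none (some sl)) nr)) := by
  have h0 : (0 : Int) ≤ nr := by nlinarith [Int.natCast_nonneg cs.length]
  have hslL : sl = (sl.toNat : Int) := (Int.toNat_of_nonneg hsl.le).symm
  have hnrn : nr = (nr.toNat : Int) := (Int.toNat_of_nonneg h0).symm
  set L := sl.toNat with hLdef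
  set n := nr.toNat with hndef
  have hL : 0 < L := by omega
  have hlen : cs.length = n * L := by
    have : ((n * L : Nat) : Int) = (cs.length : Int) := by push_cast; rw [← hnrn, ← hslL]; exact hnr
    exact_mod_cast this.symm
  have hsec : PySem.List.slice cs none (some sl) = cs.take L := by
    rw [hslL]; exact PySem.List.slice_to_natCast cs L
  rw [csLoop_eq_all, hsec]
  have hcore := core L n cs hlen
  rw [Bool.eq_iff_iff]
  simp only [List.all_eq_true, Bool.or_eq_true, decide_eq_true_eq, beq_iff_eq]
  constructor
  · intro h
    by_cases hle : nr ≤ 1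
    · exact Or.inl hle
    · refine Or.inr ?_
      show cs = (List.replicate n (cs.take L)).flatten
      apply hcore.mp
      intro j hj1 hj2
      have hmem : ((j : Int)) ∈ PySem.List.pyRange 1 nr 1 :=
        PySem.List.mem_pyRange_one.mpr ⟨by exact_mod_cast hj1, by rw [hnrn]; exact_mod_cast hj2⟩
      have hh := h _ hmem
      rw [hslL, slice_sec] at hh
      exact hh.symm
  · intro h i hi
    obtain ⟨hi1, hi2⟩ := PySem.List.mem_pyRange_one.mp hi
    rcases h with hle | heq
    · omega
    · have hall := hcore.mpr heq
      have hj : i = ((i.toNat : Nat) : Int) := (Int.toNat_of_nonneg (by omega)).symm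
      have h1 : 1 ≤ i.toNat := by omega
      have h2 : i.toNat < n := by omega
      have := hall i.toNat h1 h2
      rw [hj, hslL, slice_sec]
      exact this.symm

-- ===== VERDICT (by name: the statement is the Claim_ definition above) =====
theorem check_subsections_spec : Claim_equal_check_subsections := by
  intro candidate_id sl _ hpre
  unfold Spec_check_subsections check_subsections check_subsections_alt
  set cs := candidate_id.toList with hcs
  by_cases hmod : PySem.Int.mod (cs.length : Int) sl = 0
  · simp only [hmod, ne_eq, not_true_eq_false, if_neg, not_false_eq_true]
    set nr := PySem.Int.floordiv (cs.length : Int) sl with hnrdef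
    rcases lt_or_gt_of_ne hpre with hneg | hpos
    · -- section_length < 0: nr_sections ≤ 0, both loop-free True
      have hq := PySem.Int.floordiv_mul_add_mod (cs.length : Int) sl
      rw [hmod, add_zero, ← hnrdef] at hq
      have hle : nr ≤ 1 := by nlinarith [Int.natCast_nonneg cs.length]
      have h1 : PySem.List.pyRange 1 nr 1 = [] := by
        rw [PySem.List.pyRange_one, Int.toNat_eq_zero.mpr (by omega : nr - 1 ≤ 0)]
        simp
      simp [h1, csLoop, hle]
    · -- section_length > 0
      have hdvd : sl ∣ (cs.length : Int) := (PySem.Int.mod_eq_zero_iff_dvd _ _).mp hmod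
      have hnr : nr * sl = (cs.length : Int) := by
        rw [hnrdef, PySem.Int.floordiv_eq_ediv_of_pos hpos]
        exact Int.ediv_mul_cancel hdvd
      exact pos_case cs sl nr hpos hnr
  · simp [hmod]
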